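-- pv_equiv track=rewrite | github.com/anmolmishra307680-pixel/anmolmishra307680-pixel-prompt-to-json-backend | src/core/lm_adapter.py | _extract_components_with_hierarchy
-- ===== SOURCE A (Python) =====
-- from typing import Dict, Any, Optional, List
--
-- def _extract_components_with_hierarchy(prompt: str, design_type: str) -> List[str]:
--     """Extract components with design type specific hierarchy"""
--     prompt_lower = prompt.lower()
--
--     if design_type == 'building':
--         components = ['foundation', 'structure', 'roof']
--         if any(word in prompt_lower for word in ['window', 'glass']):
--             components.append('windows')
--         if any(word in prompt_lower for word in ['door', 'entrance']):
--             components.append('doors')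
--         if any(word in prompt_lower for word in ['hvac', 'heating', 'cooling']):
--             components.append('hvac_system')
--     elif design_type == 'vehicle':
--         components = ['chassis', 'engine', 'transmission']
--         if 'electric' in prompt_lower:
--             components.extend(['battery_pack', 'electric_motor'])
--         if any(word in prompt_lower for word in ['wheel', 'tire']):
--             components.append('wheels')
--     elif design_type == 'electronics':
--         components = ['processor', 'memory', 'display']
--         if any(word in prompt_lower for word in ['battery', 'power']):
--             components.append('power_system')
--         if any(word in prompt_lower for word in ['camera', 'sensor']):
--             components.append('sensors')
--     else:
--         components = ['main_structure', 'control_system', 'interface']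
--
--     return components
-- ===== SOURCE B (Python) =====
-- # B: one left-to-right scan of the prompt collects every matched keyword into a
-- # set; each design type then filters a complete ordered candidate-component list
-- # against that hit set (instead of A's cascade of per-branch substring searches).
--
-- KEYWORDS = ('window', 'glass', 'door', 'entrance', 'hvac', 'heating', 'cooling',
--             'electric', 'wheel', 'tire', 'battery', 'power', 'camera', 'sensor')
--
-- def _scan_keywords(text):
--     """All keywords occurring in text, found in one pass over its positions."""
--     found = set()
--     for i in range(len(text)):
--         for k in KEYWORDS:
--             if text.startswith(k, i):
--                 found.add(k)
--     return found
--
-- def _extract_components_with_hierarchy(prompt: str, design_type: str):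
--     hits = _scan_keywords(prompt.lower())
--     def on(*words):
--         return any(w in hits for w in words)
--     if design_type == 'building':
--         plan = [('foundation', True), ('structure', True), ('roof', True),
--                 ('windows', on('window', 'glass')),
--                 ('doors', on('door', 'entrance')),
--                 ('hvac_system', on('hvac', 'heating', 'cooling'))]
--     elif design_type == 'vehicle':
--         plan = [('chassis', True), ('engine', True), ('transmission', True),
--                 ('battery_pack', on('electric')),
--                 ('electric_motor', on('electric')),
--                 ('wheels', on('wheel', 'tire'))]
--     elif design_type == 'electronics':
--         plan = [('processor', True), ('memory', True), ('display', True),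
--                 ('power_system', on('battery', 'power')),
--                 ('sensors', on('camera', 'sensor'))]
--     else:
--         plan = [('main_structure', True), ('control_system', True), ('interface', True)]
--     return [c for c, keep in plan if keep]
-- ===== Notes on version B (the rewrite author's own statement) =====
-- stated objective: alternative
-- what changed: Instead of A's per-branch any(word in prompt) substring searches, B makes one left-to-right scan of the lowered prompt collecting every matched keyword into a set, then each design type filters a complete ordered candidate-component list against that hit set.
import Mathlib
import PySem

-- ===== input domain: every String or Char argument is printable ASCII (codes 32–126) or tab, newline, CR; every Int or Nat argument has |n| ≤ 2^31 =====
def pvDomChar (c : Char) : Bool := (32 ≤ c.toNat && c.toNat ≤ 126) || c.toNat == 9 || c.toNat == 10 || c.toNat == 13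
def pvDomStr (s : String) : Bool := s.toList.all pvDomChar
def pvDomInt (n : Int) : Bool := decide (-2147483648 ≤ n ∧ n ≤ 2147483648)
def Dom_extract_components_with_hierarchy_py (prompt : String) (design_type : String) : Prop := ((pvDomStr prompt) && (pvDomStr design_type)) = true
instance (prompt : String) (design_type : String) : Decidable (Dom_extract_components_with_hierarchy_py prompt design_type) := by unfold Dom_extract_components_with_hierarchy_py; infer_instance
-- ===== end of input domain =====

-- B replaces A's per-branch substring searches by one scan of the prompt collecting a
-- keyword hit set, then filters a complete ordered candidate list per design type
-- (objective: alternative).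

-- ===== PORT A =====
def extract_components_with_hierarchy_py (prompt : String) (design_type : String) : List String :=
  let prompt_lower := PySem.Str.lower prompt
  if design_type == "building" then
    let components := ["foundation", "structure", "roof"]
    let components := if (["window", "glass"] : List String).any (fun word => PySem.Str.isIn word prompt_lower) then components ++ ["windows"] else components
    let components := if (["door", "entrance"] : List String).any (fun word => PySem.Str.isIn word prompt_lower) then components ++ ["doors"] else components
    let components := if (["hvac", "heating", "cooling"] : List String).any (fun word => PySem.Str.isIn word prompt_lower) then components ++ ["hvac_system"] else components
    components
  else if design_type == "vehicle" then
    let components := ["chassis", "engine", "transmission"]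
    let components := if PySem.Str.isIn "electric" prompt_lower then components ++ ["battery_pack", "electric_motor"] else components
    let components := if (["wheel", "tire"] : List String).any (fun word => PySem.Str.isIn word prompt_lower) then components ++ ["wheels"] else components
    components
  else if design_type == "electronics" then
    let components := ["processor", "memory", "display"]
    let components := if (["battery", "power"] : List String).any (fun word => PySem.Str.isIn word prompt_lower) then components ++ ["power_system"] else components
    let components := if (["camera", "sensor"] : List String).any (fun word => PySem.Str.isIn word prompt_lower) then components ++ ["sensors"] else components
    components
  else
    ["main_structure", "control_system", "interface"]

-- ===== PORT B =====
def pvKeywords : List String :=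
  ["window", "glass", "door", "entrance", "hvac", "heating", "cooling",
   "electric", "wheel", "tire", "battery", "power", "camera", "sensor"]

-- Source B's _scan_keywords: one pass over the positions of text, collecting into a set.
-- text.startswith(k, i) with 0 ≤ i < len(text) is exactly the prefix test on text.drop i.
def pvScanKeywords (text : List Char) : PySem.Set String :=
  (List.range text.length).foldl
    (fun found i =>
      pvKeywords.foldl
        (fun found k =>
          if PySem.Chars.startswith (text.drop i) k.toList then PySem.Set.add found k else found)
        found)
    PySem.Set.empty

def extract_components_with_hierarchy_py_alt (prompt : String) (design_type : String) : List String :=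
  let hits := pvScanKeywords (PySem.Str.lower prompt).toList
  let on := fun (words : List String) => words.any (fun w => PySem.Set.contains hits w)
  let plan :=
    if design_type == "building" then
      [("foundation", true), ("structure", true), ("roof", true),
       ("windows", on ["window", "glass"]),
       ("doors", on ["door", "entrance"]),
       ("hvac_system", on ["hvac", "heating", "cooling"])]
    else if design_type == "vehicle" then
      [("chassis", true), ("engine", true), ("transmission", true),
       ("battery_pack", on ["electric"]),
       ("electric_motor", on ["electric"]),
       ("wheels", on ["wheel", "tire"])]
    else if design_type == "electronics" then
      [("processor", true), ("memory", true), ("display", true),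
       ("power_system", on ["battery", "power"]),
       ("sensors", on ["camera", "sensor"])]
    else
      [("main_structure", true), ("control_system", true), ("interface", true)]
  (plan.filter (fun p => p.2)).map (fun p => p.1)

-- ===== PRECONDITION & SPEC =====
def Spec_extract_components_with_hierarchy_py (prompt : String) (design_type : String) (out : List String) : Prop := out = extract_components_with_hierarchy_py_alt prompt design_type
instance (prompt : String) (design_type : String) (out : List String) : Decidable (Spec_extract_components_with_hierarchy_py prompt design_type out) := by unfold Spec_extract_components_with_hierarchy_py; infer_instance

-- ===== CLAIM (what is proved, stated in full; the proofs are below) =====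
def Claim_equal_extract_components_with_hierarchy_py : Prop := ∀ (prompt : String) (design_type : String), Dom_extract_components_with_hierarchy_py prompt design_type → Spec_extract_components_with_hierarchy_py prompt design_type (extract_components_with_hierarchy_py prompt design_type)

-- ===== LEMMAS AND PROOFS =====

-- membership in the inner fold (over the keyword list)
theorem pv_mem_inner (l : List String) (p : String → Bool) (s : PySem.Set String) (x : String) :
    x ∈ l.foldl (fun s k => if p k then PySem.Set.add s k else s) s ↔
      x ∈ s ∨ (x ∈ l ∧ p x = true) := by
  induction l generalizing s with
  | nil => simp
  | cons k l ih =>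
    simp only [List.foldl_cons, ih]
    by_cases hk : p k = true
    · by_cases hx : x = k
      · subst hx; simp [hk, PySem.Set.mem_add]
      · simp [hk, hx, PySem.Set.mem_add]
    · by_cases hx : x = k
      · subst hx; simp [hk]
      · simp [hk, hx]

-- membership in the outer fold (over the index list)
theorem pv_mem_outer (text : List Char) (idxs : List Nat) (s : PySem.Set String) (x : String) :
    x ∈ idxs.foldl
        (fun found i =>
          pvKeywords.foldl
            (fun found k =>
              if PySem.Chars.startswith (text.drop i) k.toList then PySem.Set.add found k else found)
            found)
        s ↔
      x ∈ s ∨ (x ∈ pvKeywords ∧ ∃ i ∈ idxs, PySem.Chars.startswith (text.drop i) x.toList = true) := by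
  induction idxs generalizing s with
  | nil => simp
  | cons i idxs ih =>
    simp only [List.foldl_cons, ih, pv_mem_inner]
    constructor
    · rintro ((h | ⟨hk, hp⟩) | ⟨hk, j, hj, hp⟩)
      · exact Or.inl h
      · exact Or.inr ⟨hk, i, List.mem_cons_self, hp⟩
      · exact Or.inr ⟨hk, j, List.mem_cons_of_mem _ hj, hp⟩
    · rintro (h | ⟨hk, j, hj, hp⟩)
      · exact Or.inl (Or.inl h)
      · rcases List.mem_cons.mp hj with rfl | hj
        · exact Or.inl (Or.inr ⟨hk, hp⟩)
        · exact Or.inr ⟨hk, j, hj, hp⟩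

-- the scanned hit set decides exactly Python's "k in text" for every keyword
theorem pv_contains_scan (text : List Char) (k : String)
    (hk : k ∈ pvKeywords) (hne : k.toList ≠ []) :
    PySem.Set.contains (pvScanKeywords text) k = PySem.Chars.isIn k.toList text := by
  have hmem : k ∈ pvScanKeywords text ↔ ∃ i ∈ List.range text.length,
      PySem.Chars.startswith (text.drop i) k.toList = true := by
    unfold pvScanKeywords
    rw [pv_mem_outer]
    simp [PySem.Set.empty, hk]
  by_cases h : PySem.Chars.isIn k.toList text = true
  · rw [h]
    rw [PySem.Set.contains_iff, hmem]
    obtain ⟨j, hj⟩ := (PySem.Chars.exists_prefix_drop_iff_isIn (sub := k.toList) (s := text)).mpr h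
    have hjlt : j < text.length := by
      by_contra hge
      have : text.drop j = [] := List.drop_eq_nil_of_le (by omega)
      rw [this] at hj
      exact hne (List.prefix_nil.mp hj)
    exact ⟨j, List.mem_range.mpr hjlt, (PySem.Chars.startswith_iff _ _).mpr hj⟩
  · have h' := Bool.eq_false_iff.mpr h
    rw [h']
    apply Bool.eq_false_iff.mpr
    intro hc
    apply h
    rw [PySem.Set.contains_iff, hmem] at hc
    obtain ⟨i, _, hp⟩ := hc
    exact (PySem.Chars.exists_prefix_drop_iff_isIn (sub := k.toList) (s := text)).mp
      ⟨i, (PySem.Chars.startswith_iff _ _).mp hp⟩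

-- same, phrased on Strings as A uses it
theorem pv_contains_scan' (pl : String) (k : String)
    (hk : k ∈ pvKeywords) (hne : k.toList ≠ []) :
    PySem.Set.contains (pvScanKeywords pl.toList) k = PySem.Str.isIn k pl := by
  rw [pv_contains_scan pl.toList k hk hne]
  simp [PySem.Str.isIn]

-- ===== VERDICT (by name: the statement is the Claim_ definition above) =====
set_option maxHeartbeats 1000000 in
theorem extract_components_with_hierarchy_py_spec : Claim_equal_extract_components_with_hierarchy_py := by
  intro prompt design_type _
  unfold Spec_extract_components_with_hierarchy_py
  unfold extract_components_with_hierarchy_py extract_components_with_hierarchy_py_alt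
  simp only [List.any_cons, List.any_nil, Bool.or_false]
  rw [pv_contains_scan' _ "window" (by decide) (by decide),
      pv_contains_scan' _ "glass" (by decide) (by decide),
      pv_contains_scan' _ "door" (by decide) (by decide),
      pv_contains_scan' _ "entrance" (by decide) (by decide),
      pv_contains_scan' _ "hvac" (by decide) (by decide),
      pv_contains_scan' _ "heating" (by decide) (by decide),
      pv_contains_scan' _ "cooling" (by decide) (by decide),
      pv_contains_scan' _ "electric" (by decide) (by decide),
      pv_contains_scan' _ "wheel" (by decide) (by decide),
      pv_contains_scan' _ "tire" (by decide) (by decide),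
      pv_contains_scan' _ "battery" (by decide) (by decide),
      pv_contains_scan' _ "power" (by decide) (by decide),
      pv_contains_scan' _ "camera" (by decide) (by decide),
      pv_contains_scan' _ "sensor" (by decide) (by decide)]
  by_cases hb : (design_type == "building") = true
  · simp only [hb, if_true]
    generalize (PySem.Str.isIn "window" (PySem.Str.lower prompt) || PySem.Str.isIn "glass" (PySem.Str.lower prompt)) = c1
    generalize (PySem.Str.isIn "door" (PySem.Str.lower prompt) || PySem.Str.isIn "entrance" (PySem.Str.lower prompt)) = c2
    generalize (PySem.Str.isIn "hvac" (PySem.Str.lower prompt) || (PySem.Str.isIn "heating" (PySem.Str.lower prompt) || PySem.Str.isIn "cooling" (PySem.Str.lower prompt))) = c3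
    cases c1 <;> cases c2 <;> cases c3 <;> rfl
  · simp only [Bool.not_eq_true] at hb
    simp only [hb]
    by_cases hv : (design_type == "vehicle") = true
    · simp only [hv, if_true]
      generalize (PySem.Str.isIn "electric" (PySem.Str.lower prompt)) = c4
      generalize (PySem.Str.isIn "wheel" (PySem.Str.lower prompt) || PySem.Str.isIn "tire" (PySem.Str.lower prompt)) = c5
      cases c4 <;> cases c5 <;> rfl
    · simp only [Bool.not_eq_true] at hv
      simp only [hv]
      by_cases he : (design_type == "electronics") = true
      · simp only [he, if_true]
        generalize (PySem.Str.isIn "battery" (PySem.Str.lower prompt) || PySem.Str.isIn "power" (PySem.Str.lower prompt)) = c6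
        generalize (PySem.Str.isIn "camera" (PySem.Str.lower prompt) || PySem.Str.isIn "sensor" (PySem.Str.lower prompt)) = c7
        cases c6 <;> cases c7 <;> rfl
      · simp only [Bool.not_eq_true] at he
        simp only [he]
        rfl
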